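-- pv_equiv track=rewrite | github.com/jackseg80/scalp-radar | backend/backtesting/engine.py | _last_available_before
-- ===== SOURCE A (Python) =====
-- def _last_available_before(
--     target_ts: str, sorted_timestamps: list[str]
-- ) -> str | None:
--     """Retourne le dernier timestamp <= target dans la liste triée."""
--     result = None
--     for ts in sorted_timestamps:
--         if ts <= target_ts:
--             result = ts
--         else:
--             break
--     return result
-- ===== SOURCE B (Python) =====
-- def _last_available_before(
--     target_ts: str, sorted_timestamps: list[str]
-- ) -> str | None:
--     """Retourne le dernier timestamp <= target dans la liste triée (binary search)."""
--     lo, hi = 0, len(sorted_timestamps)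
--     while lo < hi:
--         mid = (lo + hi) // 2
--         if target_ts < sorted_timestamps[mid]:
--             hi = mid
--         else:
--             lo = mid + 1
--     return sorted_timestamps[lo - 1] if lo else None
-- ===== Notes on version B (the rewrite author's own statement) =====
-- stated objective: alternative
-- what changed: Replaced the linear prefix scan with a hand-written binary search (bisect_right) that returns the element preceding the insertion point, exact on the documented domain of ascending-sorted lists (O(log n) comparisons vs O(n), though a timing run's random unsorted inputs fall outside Pre_ so no speed is claimed).
-- outside the precondition, e.g. on _last_available_before('b', ['c', 'a']): A returns None, B returns 'a'
import Mathlib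
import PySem

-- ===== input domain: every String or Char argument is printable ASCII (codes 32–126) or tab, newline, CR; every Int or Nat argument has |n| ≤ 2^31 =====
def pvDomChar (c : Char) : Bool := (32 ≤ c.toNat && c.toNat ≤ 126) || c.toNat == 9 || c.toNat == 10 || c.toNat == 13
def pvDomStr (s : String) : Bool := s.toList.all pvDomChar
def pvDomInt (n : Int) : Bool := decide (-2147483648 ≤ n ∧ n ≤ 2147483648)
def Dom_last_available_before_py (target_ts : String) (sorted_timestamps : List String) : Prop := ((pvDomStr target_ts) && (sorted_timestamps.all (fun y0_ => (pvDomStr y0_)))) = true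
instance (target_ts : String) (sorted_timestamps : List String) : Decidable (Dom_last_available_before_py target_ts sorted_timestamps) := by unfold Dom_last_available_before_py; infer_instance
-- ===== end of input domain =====

-- B replaces A's linear prefix scan with a binary search (bisect_right) for the insertion
-- point; exact on ascending-sorted lists (the documented contract), admitted by Pre_ below.

-- ===== PORT A =====
-- the for-loop with `break`: state = `result`
def lastLoopA (target_ts : String) : Option String → List String → Option String
  | result, [] => result
  | result, ts :: rest =>
      if ts ≤ target_ts then lastLoopA target_ts (some ts) rest else result

def last_available_before_py (target_ts : String) (sorted_timestamps : List String) : Option String :=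
  lastLoopA target_ts none sorted_timestamps

-- ===== PORT B =====
-- the hand-written bisect_right loop of Source B (lo/hi while-loop)
def bisectRightStr (target_ts : String) (xs : List String) (lo hi : Nat) : Nat :=
  if lo < hi then
    let mid := (lo + hi) / 2
    if target_ts < xs.getD mid "" then bisectRightStr target_ts xs lo mid
    else bisectRightStr target_ts xs (mid + 1) hi
  else lo
termination_by hi - lo
decreasing_by all_goals omega

def last_available_before_py_alt (target_ts : String) (sorted_timestamps : List String) : Option String :=
  let lo := bisectRightStr target_ts sorted_timestamps 0 sorted_timestamps.length
  if lo ≠ 0 then some (sorted_timestamps.getD (lo - 1) "") else none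

-- ===== PRECONDITION & SPEC =====
-- Pre_ excludes lists that are not sorted ascending (the documented contract: the parameter is
-- named and documented as a sorted list) unless all elements are ≤ target or all are > target
-- (where the binary search provably agrees anyway): on other unsorted input A's early-`break`
-- prefix value is an artefact of its linear scan that a binary search cannot reproduce.
-- (a ≤ b is stated as ¬ b.toList < a.toList, which is String's ≤ and is kernel-decidable.)
def Pre_last_available_before_py (target_ts : String) (sorted_timestamps : List String) : Prop :=
  List.Pairwise (fun a b => ¬ b.toList < a.toList) sorted_timestamps ∨
  (∀ x ∈ sorted_timestamps, ¬ target_ts.toList < x.toList) ∨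
  (∀ x ∈ sorted_timestamps, target_ts.toList < x.toList)
instance (target_ts : String) (sorted_timestamps : List String) : Decidable (Pre_last_available_before_py target_ts sorted_timestamps) := by unfold Pre_last_available_before_py; infer_instance

def pvWitness_last_available_before_py : String × List String := ("b", ["a", "b", "c"])

def Spec_last_available_before_py (target_ts : String) (sorted_timestamps : List String) (out : Option String) : Prop := out = last_available_before_py_alt target_ts sorted_timestamps
instance (target_ts : String) (sorted_timestamps : List String) (out : Option String) : Decidable (Spec_last_available_before_py target_ts sorted_timestamps out) := by unfold Spec_last_available_before_py; infer_instance

-- ===== CLAIM (what is proved, stated in full; the proofs are below) =====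
def Claim_equal_last_available_before_py : Prop := ∀ (target_ts : String) (sorted_timestamps : List String), Dom_last_available_before_py target_ts sorted_timestamps → Pre_last_available_before_py target_ts sorted_timestamps → Spec_last_available_before_py target_ts sorted_timestamps (last_available_before_py target_ts sorted_timestamps)

-- ===== LEMMAS AND PROOFS =====

theorem str_le_iff (a b : String) : a ≤ b ↔ ¬ b.toList < a.toList := by
  rw [← String.lt_iff_toList_lt]; exact not_lt.symm

theorem takeWhile_len_le (p : String → Bool) (l : List String) :
    (l.takeWhile p).length ≤ l.length :=
  (List.takeWhile_sublist p).length_le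

theorem getLast?_cons_or (a : String) (l : List String) (r : Option String) :
    ((a :: l).getLast?).or r = (l.getLast?).or (some a) := by
  cases l with
  | nil => simp
  | cons b l' =>
      rw [List.getLast?_cons_cons]
      cases hgl : (b :: l').getLast? with
      | none =>
          exact absurd (List.getLast?_eq_none_iff.mp hgl) (by simp)
      | some x => simp

-- A's loop returns the last element of the ≤-prefix (falling back to the accumulator)
theorem lastLoopA_eq (t : String) (xs : List String) (r : Option String) :
    lastLoopA t r xs = ((xs.takeWhile (fun ts => decide (ts ≤ t))).getLast?).or r := by
  induction xs generalizing r with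
  | nil => simp [lastLoopA]
  | cons ts rest ih =>
      by_cases h : ts ≤ t
      · rw [lastLoopA, if_pos h, ih,
          List.takeWhile_cons_of_pos (p := fun ts => decide (ts ≤ t)) (by simpa using h),
          getLast?_cons_or]
      · rw [lastLoopA, if_neg h, List.takeWhile_cons_of_neg (by simpa using h),
          List.getLast?_nil, Option.or]

-- index form of the ≤-prefix: everything strictly before its length is ≤ t …
theorem takeWhile_lt_le (t : String) (xs : List String) (i : Nat)
    (h : i < (xs.takeWhile (fun ts => decide (ts ≤ t))).length) :
    i < xs.length ∧ xs.getD i "" ≤ t := by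
  have hpre : xs.takeWhile (fun ts => decide (ts ≤ t)) ++ xs.dropWhile (fun ts => decide (ts ≤ t)) = xs :=
    List.takeWhile_append_dropWhile
  have hlen : i < xs.length := by
    have := takeWhile_len_le (fun ts => decide (ts ≤ t)) xs
    omega
  refine ⟨hlen, ?_⟩
  have hget : xs[i]? = (xs.takeWhile (fun ts => decide (ts ≤ t)))[i]? := by
    conv_lhs => rw [← hpre]
    exact List.getElem?_append_left h
  have hmem : (xs.takeWhile (fun ts => decide (ts ≤ t)))[i] ∈ xs.takeWhile (fun ts => decide (ts ≤ t)) :=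
    List.getElem_mem h
  have hp := List.mem_takeWhile_imp hmem
  have hxi : xs[i] = (xs.takeWhile (fun ts => decide (ts ≤ t)))[i] := by
    have h1 : xs[i]? = some xs[i] := List.getElem?_eq_getElem hlen
    have h2 : (xs.takeWhile (fun ts => decide (ts ≤ t)))[i]? = some (xs.takeWhile (fun ts => decide (ts ≤ t)))[i] :=
      List.getElem?_eq_getElem h
    rw [h1, h2] at hget; exact Option.some.inj hget
  rw [List.getD_eq_getElem xs "" hlen, hxi]
  simpa using hp

-- … and the element at its length (if any) is > t
theorem takeWhile_len_gt (t : String) (xs : List String)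
    (h : (xs.takeWhile (fun ts => decide (ts ≤ t))).length < xs.length) :
    t < xs.getD (xs.takeWhile (fun ts => decide (ts ≤ t))).length "" := by
  set p : String → Bool := fun ts => decide (ts ≤ t) with hp
  set k := (xs.takeWhile p).length with hk
  have hpre : xs.takeWhile p ++ xs.dropWhile p = xs := List.takeWhile_append_dropWhile
  have hdne : xs.dropWhile p ≠ [] := by
    intro hnil
    have := congrArg List.length hpre
    simp [hnil] at this
    omega
  have hhead := List.head_dropWhile_not p hdne
  have hget : xs[k]? = some ((xs.dropWhile p).head hdne) := by
    conv_lhs => rw [← hpre]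
    rw [List.getElem?_append_right (by omega)]
    have h0 : k - (xs.takeWhile p).length = 0 := by omega
    rw [h0, ← List.head?_eq_getElem?]
    exact List.head?_eq_some_head hdne
  have hgd : xs.getD k "" = (xs.dropWhile p).head hdne := by
    rw [List.getD_eq_getElem xs "" h]
    rw [List.getElem?_eq_getElem h] at hget
    exact Option.some.inj hget
  rw [hgd]
  by_contra hle
  have : p ((xs.dropWhile p).head hdne) = true := by
    simpa [hp] using (not_lt.mp hle)
  rw [hhead] at this; exact Bool.false_ne_true this

-- sortedness in index form
theorem sorted_mono (xs : List String)
    (hs : List.Pairwise (fun a b => ¬ b.toList < a.toList) xs)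
    (i j : Nat) (hij : i ≤ j) (hj : j < xs.length) :
    xs.getD i "" ≤ xs.getD j "" := by
  rcases Nat.lt_or_ge i j with hlt | hge
  · have := (List.pairwise_iff_getElem).mp hs i j (by omega) hj hlt
    rw [List.getD_eq_getElem xs "" (by omega), List.getD_eq_getElem xs "" hj]
    exact (str_le_iff _ _).mpr this
  · have : i = j := by omega
    subst this; exact le_refl _

-- binary-search correctness: under the loop invariant lo ≤ k ≤ hi it finds k
theorem bisect_eq (t : String) (xs : List String)
    (hs : List.Pairwise (fun a b => ¬ b.toList < a.toList) xs) :
    ∀ lo hi, lo ≤ (xs.takeWhile (fun ts => decide (ts ≤ t))).length →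
      (xs.takeWhile (fun ts => decide (ts ≤ t))).length ≤ hi → hi ≤ xs.length →
      bisectRightStr t xs lo hi = (xs.takeWhile (fun ts => decide (ts ≤ t))).length := by
  intro lo hi
  induction lo, hi using bisectRightStr.induct t xs with
  | case1 lo hi hlh mid hm ih =>
      intro h1 h2 h3
      have hmid : mid = (lo + hi) / 2 := rfl
      rw [bisectRightStr, if_pos hlh]
      simp only [show (lo + hi) / 2 = mid from rfl, if_pos hm]
      refine ih h1 ?_ (by omega)
      -- xs[mid] > t forces k ≤ mid
      by_contra hgt
      have hmlt : mid < (xs.takeWhile (fun ts => decide (ts ≤ t))).length := by omega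
      exact absurd hm (not_lt.mpr (takeWhile_lt_le t xs mid hmlt).2)
  | case2 lo hi hlh mid hm ih =>
      intro h1 h2 h3
      have hmid : mid = (lo + hi) / 2 := rfl
      rw [bisectRightStr, if_pos hlh]
      simp only [show (lo + hi) / 2 = mid from rfl, if_neg hm]
      refine ih ?_ h2 h3
      -- xs[mid] ≤ t forces mid < k
      by_contra hgt
      have hkm : (xs.takeWhile (fun ts => decide (ts ≤ t))).length ≤ mid := by omega
      have hmid_lt : mid < xs.length := by omega
      have hklt : (xs.takeWhile (fun ts => decide (ts ≤ t))).length < xs.length := by omega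
      have hkt := takeWhile_len_gt t xs hklt
      have hmono := sorted_mono xs hs _ mid hkm hmid_lt
      exact hm (lt_of_lt_of_le hkt hmono)
  | case3 lo hi hlh =>
      intro h1 h2 h3
      rw [bisectRightStr, if_neg hlh]
      omega

-- degenerate thresholds: if every element is ≤ t the search reaches hi, if every element is > t it stays at lo
theorem bisect_all_le (t : String) (xs : List String)
    (hall : ∀ x ∈ xs, ¬ t.toList < x.toList) :
    ∀ lo hi, lo ≤ hi → hi ≤ xs.length → bisectRightStr t xs lo hi = hi := by
  intro lo hi
  induction lo, hi using bisectRightStr.induct t xs with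
  | case1 lo hi hlh mid hm ih =>
      intro h1 h2
      have hmid : mid = (lo + hi) / 2 := rfl
      exfalso
      have hmlt : mid < xs.length := by omega
      have hmem : xs.getD mid "" ∈ xs := by
        rw [List.getD_eq_getElem xs "" hmlt]; exact List.getElem_mem hmlt
      exact hall _ hmem (String.lt_iff_toList_lt.mp hm)
  | case2 lo hi hlh mid hm ih =>
      intro h1 h2
      have hmid : mid = (lo + hi) / 2 := rfl
      rw [bisectRightStr, if_pos hlh]
      simp only [show (lo + hi) / 2 = mid from rfl, if_neg hm]
      exact ih (by omega) h2
  | case3 lo hi hlh =>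
      intro h1 h2
      rw [bisectRightStr, if_neg hlh]
      omega

theorem bisect_all_gt (t : String) (xs : List String)
    (hall : ∀ x ∈ xs, t.toList < x.toList) :
    ∀ lo hi, lo ≤ hi → hi ≤ xs.length → bisectRightStr t xs lo hi = lo := by
  intro lo hi
  induction lo, hi using bisectRightStr.induct t xs with
  | case1 lo hi hlh mid hm ih =>
      intro h1 h2
      have hmid : mid = (lo + hi) / 2 := rfl
      rw [bisectRightStr, if_pos hlh]
      simp only [show (lo + hi) / 2 = mid from rfl, if_pos hm]
      exact ih (by omega) (by omega)
  | case2 lo hi hlh mid hm ih =>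
      intro h1 h2
      have hmid : mid = (lo + hi) / 2 := rfl
      exfalso
      have hmlt : mid < xs.length := by omega
      have hmem : xs.getD mid "" ∈ xs := by
        rw [List.getD_eq_getElem xs "" hmlt]; exact List.getElem_mem hmlt
      exact hm (String.lt_iff_toList_lt.mpr (hall _ hmem))
  | case3 lo hi hlh =>
      intro h1 h2
      rw [bisectRightStr, if_neg hlh]

-- ===== VERDICT (by name: the statement is the Claim_ definition above) =====
theorem last_available_before_py_spec : Claim_equal_last_available_before_py := by
  intro t xs _hd hpre
  unfold Spec_last_available_before_py last_available_before_py
  set p : String → Bool := fun ts => decide (ts ≤ t) with hp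
  set k := (xs.takeWhile p).length with hk
  have hb : bisectRightStr t xs 0 xs.length = k := by
    rcases hpre with hs | hle | hgt
    · exact bisect_eq t xs hs 0 xs.length (Nat.zero_le _) (takeWhile_len_le p xs) (le_refl _)
    · have hself : xs.takeWhile p = xs :=
        List.takeWhile_eq_self_iff.mpr
          (fun x hx => by simpa [hp] using (str_le_iff x t).mpr (hle x hx))
      have hkn : k = xs.length := by rw [hk, hself]
      rw [bisect_all_le t xs hle 0 xs.length (Nat.zero_le _) (le_refl _), hkn]
    · have hnil : xs.takeWhile p = [] := by
        cases xs with
        | nil => rfl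
        | cons a l =>
            have hna : ¬ a ≤ t := fun hle' => (str_le_iff a t).mp hle' (hgt a (by simp))
            rw [List.takeWhile_cons_of_neg (p := p) (by simpa [hp] using hna)]
      have hk0 : k = 0 := by rw [hk, hnil]; rfl
      rw [bisect_all_gt t xs hgt 0 xs.length (Nat.zero_le _) (le_refl _), hk0]
  have halt : last_available_before_py_alt t xs
      = if k ≠ 0 then some (xs.getD (k - 1) "") else none := by
    unfold last_available_before_py_alt
    rw [hb]
  rw [halt, lastLoopA_eq, Option.or_none]
  by_cases hk0 : k = 0
  · have hnil : xs.takeWhile p = [] := List.length_eq_zero_iff.mp hk0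
    rw [if_neg (by omega), hnil, List.getLast?_nil]
  · rw [if_pos hk0]
    have hk_le : k ≤ xs.length := takeWhile_len_le p xs
    have hk1 : k - 1 < k := by omega
    have hpre2 : xs.takeWhile p ++ xs.dropWhile p = xs := List.takeWhile_append_dropWhile
    have hget : xs[k-1]? = (xs.takeWhile p)[k-1]? := by
      conv_lhs => rw [← hpre2]
      exact List.getElem?_append_left hk1
    rw [List.getLast?_eq_getElem?, ← hk, ← hget]
    rw [List.getElem?_eq_getElem (by omega), List.getD_eq_getElem xs "" (by omega)]
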